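-- pv_equiv track=rewrite | github.com/baptisteq5/Projet-2-NSI | baguette.py | baguette
-- ===== SOURCE A (Python) =====
-- def baguette(gallions: int, mornilles: int, noises: int):
--     '''
--     Paramètres
--     ----------
--     gallions : int
--         Nombre de gallions à rendre.
--     mornilles : int
--         Nombre de mornilles à rendre.
--     noises : int
--         Nombre de noises à rendre.
--
--     Renvoie
--     -------
--     Dictionnaire contenant les clés gallions, mornilles et noises,
--     version optimisée des sommes entrées en paramètres.
--
--     '''
--     assert type(gallions) == int, "Le paramètre gallions doit être un entier"
--     assert type(mornilles) == int, "Le paramètre mornilles doit être un entier"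
--     assert type(noises) == int, "Le paramètre noises doit être un entier"
--     total_noises = noises + 29 * mornilles + 493 * gallions
--     a_rendre = {'gallions': 0, 'mornilles': 0, 'noises': 0}
--     while total_noises >= 493:
--         a_rendre['gallions'] += 1
--         total_noises -= 493
--     while total_noises >= 29:
--         a_rendre['mornilles'] += 1
--         total_noises -= 29
--     a_rendre['noises'] += total_noises
--     return a_rendre
-- ===== SOURCE B (Python) =====
-- def baguette(gallions: int, mornilles: int, noises: int):
--     total = noises + 29 * mornilles + 493 * gallions
--     g = max(0, total // 493)
--     r = total - 493 * g
--     m = max(0, r // 29)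
--     return {'gallions': g, 'mornilles': m, 'noises': r - 29 * m}
-- ===== Notes on version B (the rewrite author's own statement) =====
-- stated objective: faster
-- what changed: Replaces the two repeated-subtraction while loops (one step per coin) with closed-form floor division/remainder by 493 and 29, clamped at 0 so negative totals stay untouched as in A.
import Mathlib
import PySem

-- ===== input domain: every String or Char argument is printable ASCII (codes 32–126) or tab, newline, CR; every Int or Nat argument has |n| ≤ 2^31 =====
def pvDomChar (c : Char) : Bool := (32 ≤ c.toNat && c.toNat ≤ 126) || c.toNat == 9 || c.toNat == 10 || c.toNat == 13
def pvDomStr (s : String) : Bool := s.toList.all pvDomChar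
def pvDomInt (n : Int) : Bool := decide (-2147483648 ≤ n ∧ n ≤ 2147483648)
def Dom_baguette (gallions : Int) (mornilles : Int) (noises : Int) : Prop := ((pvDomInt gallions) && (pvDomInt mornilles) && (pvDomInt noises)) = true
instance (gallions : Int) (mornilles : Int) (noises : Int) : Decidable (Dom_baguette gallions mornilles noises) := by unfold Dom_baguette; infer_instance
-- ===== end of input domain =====

-- B replaces A's repeated-subtraction while loops with closed-form floor division (clamped at 0); faster (O(1) vs O(total)).

-- ===== PORT A =====
-- while total_noises >= 493: gallions += 1; total_noises -= 493
def baguetteLoop493 (total : Int) (g : Int) : Int × Int :=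
  if _h : 493 ≤ total then baguetteLoop493 (total - 493) (g + 1) else (g, total)
  termination_by total.toNat
  decreasing_by omega

-- while total_noises >= 29: mornilles += 1; total_noises -= 29
def baguetteLoop29 (total : Int) (m : Int) : Int × Int :=
  if _h : 29 ≤ total then baguetteLoop29 (total - 29) (m + 1) else (m, total)
  termination_by total.toNat
  decreasing_by omega

def baguette (gallions : Int) (mornilles : Int) (noises : Int) : List (String × Int) :=
  let total₀ := noises + 29 * mornilles + 493 * gallions
  let (g, total₁) := baguetteLoop493 total₀ 0
  let (m, total₂) := baguetteLoop29 total₁ 0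
  [("gallions", g), ("mornilles", m), ("noises", 0 + total₂)]

-- ===== PORT B =====
def baguette_alt (gallions : Int) (mornilles : Int) (noises : Int) : List (String × Int) :=
  let total := noises + 29 * mornilles + 493 * gallions
  let g := max 0 (PySem.Int.floordiv total 493)
  let r := total - 493 * g
  let m := max 0 (PySem.Int.floordiv r 29)
  [("gallions", g), ("mornilles", m), ("noises", r - 29 * m)]

-- ===== PRECONDITION & SPEC =====
def Spec_baguette (gallions : Int) (mornilles : Int) (noises : Int) (out : List (String × Int)) : Prop := out = baguette_alt gallions mornilles noises
instance (gallions : Int) (mornilles : Int) (noises : Int) (out : List (String × Int)) : Decidable (Spec_baguette gallions mornilles noises out) := by unfold Spec_baguette; infer_instance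

-- ===== CLAIM (what is proved, stated in full; the proofs are below) =====
def Claim_equal_baguette : Prop := ∀ (gallions : Int) (mornilles : Int) (noises : Int), Dom_baguette gallions mornilles noises → Spec_baguette gallions mornilles noises (baguette gallions mornilles noises)

-- ===== LEMMAS AND PROOFS =====

-- A's while loop over 493 is the clamped floor quotient/remainder.
theorem baguetteLoop493_eq (total g : Int) :
    baguetteLoop493 total g =
      (g + max 0 (PySem.Int.floordiv total 493),
       total - 493 * max 0 (PySem.Int.floordiv total 493)) := by
  fun_induction baguetteLoop493 total g with
  | case1 total g h ih =>
      rw [ih]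
      rw [PySem.Int.floordiv_eq_ediv_of_pos (a := total) (by omega),
          PySem.Int.floordiv_eq_ediv_of_pos (a := total - 493) (by omega)]
      simp only [Prod.mk.injEq]; constructor <;> omega
  | case2 total g h =>
      rw [PySem.Int.floordiv_eq_ediv_of_pos (a := total) (by omega)]
      simp only [Prod.mk.injEq]; constructor <;> omega

theorem baguetteLoop29_eq (total m : Int) :
    baguetteLoop29 total m =
      (m + max 0 (PySem.Int.floordiv total 29),
       total - 29 * max 0 (PySem.Int.floordiv total 29)) := by
  fun_induction baguetteLoop29 total m with
  | case1 total m h ih =>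
      rw [ih]
      rw [PySem.Int.floordiv_eq_ediv_of_pos (a := total) (by omega),
          PySem.Int.floordiv_eq_ediv_of_pos (a := total - 29) (by omega)]
      simp only [Prod.mk.injEq]; constructor <;> omega
  | case2 total m h =>
      rw [PySem.Int.floordiv_eq_ediv_of_pos (a := total) (by omega)]
      simp only [Prod.mk.injEq]; constructor <;> omega

-- ===== VERDICT (by name: the statement is the Claim_ definition above) =====
theorem baguette_spec : Claim_equal_baguette := by
  intro gallions mornilles noises _
  simp only [Spec_baguette, baguette, baguette_alt, baguetteLoop493_eq, baguetteLoop29_eq,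
    zero_add]
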